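-- pv_equiv track=rewrite | github.com/pypi-data/pypi-mirror-361 | packages/infradsl/infradsl-0.1.4.tar.gz/infradsl-0.1.4/infradsl/core/compliance_validator.py | _prioritize_remediation
-- ===== SOURCE A (Python) =====
-- from typing import Dict, Any, List
--
-- def _prioritize_remediation(violations: List[str]) -> List[Dict[str, Any]]:
--     """Prioritize remediation actions"""
--
--     priority_mapping = {
--         "encryption": {"priority": "critical", "effort": "medium"},
--         "protocol": {"priority": "high", "effort": "low"},
--         "segmentation": {"priority": "high", "effort": "high"},
--         "monitoring": {"priority": "medium", "effort": "low"},
--         "subnet": {"priority": "medium", "effort": "medium"}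
--     }
--
--     prioritized = []
--     for violation in violations:
--         priority_info = {"violation": violation, "priority": "low", "effort": "unknown"}
--
--         for key, mapping in priority_mapping.items():
--             if key in violation.lower():
--                 priority_info.update(mapping)
--                 break
--
--         prioritized.append(priority_info)
--
--     # Sort by priority: critical -> high -> medium -> low
--     priority_order = {"critical": 0, "high": 1, "medium": 2, "low": 3}
--     prioritized.sort(key=lambda x: priority_order.get(x["priority"], 4))
--
--     return prioritized
-- ===== SOURCE B (Python) =====
-- from typing import Dict, Any, List
--
-- _RULES = [
--     ("encryption", "critical", "medium"),
--     ("protocol", "high", "low"),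
--     ("segmentation", "high", "high"),
--     ("monitoring", "medium", "low"),
--     ("subnet", "medium", "medium"),
-- ]
--
-- def _classify(violation: str):
--     low = violation.lower()
--     for key, priority, effort in _RULES:
--         if key in low:
--             return priority, effort
--     return "low", "unknown"
--
-- def _prioritize_remediation(violations: List[str]) -> List[Dict[str, Any]]:
--     """Prioritize remediation actions (single pass, bucket sort by priority)."""
--     buckets = {"critical": [], "high": [], "medium": [], "low": []}
--     for violation in violations:
--         priority, effort = _classify(violation)
--         buckets[priority].append(
--             {"violation": violation, "priority": priority, "effort": effort}
--         )
--     return buckets["critical"] + buckets["high"] + buckets["medium"] + buckets["low"]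
-- ===== Notes on version B (the rewrite author's own statement) =====
-- stated objective: alternative
-- what changed: Replaces the collect-then-stable-sort pipeline with a single pass that appends each classified item to one of four priority buckets and concatenates them critical->high->medium->low (a bucket sort), lifting the classification into a helper that returns (priority, effort) instead of mutating a dict.
import Mathlib
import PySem

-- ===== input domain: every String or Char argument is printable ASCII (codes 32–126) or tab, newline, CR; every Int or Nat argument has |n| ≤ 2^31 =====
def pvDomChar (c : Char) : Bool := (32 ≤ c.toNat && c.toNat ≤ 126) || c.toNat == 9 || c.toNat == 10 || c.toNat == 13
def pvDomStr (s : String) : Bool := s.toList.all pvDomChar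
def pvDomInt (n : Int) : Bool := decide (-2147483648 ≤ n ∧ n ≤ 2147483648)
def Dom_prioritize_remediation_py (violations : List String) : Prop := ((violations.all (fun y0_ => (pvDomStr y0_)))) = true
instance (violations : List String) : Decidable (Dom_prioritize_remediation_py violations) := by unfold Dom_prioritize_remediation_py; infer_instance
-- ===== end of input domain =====

-- B replaces A's collect-then-stable-sort with one pass into four priority buckets
-- concatenated critical->high->medium->low (bucket sort); same return value.


-- ===== PORT A =====
-- priority_mapping, in insertion order; each inner dict carried as (priority, effort)
def pvPrioMapA : List (String × String × String) :=
  [("encryption", "critical", "medium"), ("protocol", "high", "low"),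
   ("segmentation", "high", "high"), ("monitoring", "medium", "low"),
   ("subnet", "medium", "medium")]

-- the inner 'for key, mapping in priority_mapping.items(): if key in violation.lower(): update; break'
def pvInnerA : List (String × String × String) → PySem.Dict String String → String → PySem.Dict String String
  | [], d, _ => d
  | (k, p, e) :: rest, d, v =>
      if PySem.Str.isIn k (PySem.Str.lower v) then (d.insert "priority" p).insert "effort" e
      else pvInnerA rest d v

def pvInfoA (v : String) : PySem.Dict String String :=
  pvInnerA pvPrioMapA (PySem.Dict.ofList [("violation", v), ("priority", "low"), ("effort", "unknown")]) v

def pvPriorityOrderA : PySem.Dict String Int :=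
  PySem.Dict.ofList [("critical", 0), ("high", 1), ("medium", 2), ("low", 3)]

-- sort key 'priority_order.get(x["priority"], 4)'; x["priority"] always succeeds here
-- (every dict built above carries "priority"), so the total getD with dummy default "" is exact
def pvKeyA (d : PySem.Dict String String) : Int :=
  pvPriorityOrderA.getD (d.getD "priority" "") 4

def prioritize_remediation_py (violations : List String) : List (List (String × String)) :=
  let prioritized := violations.foldl (fun acc v => acc ++ [pvInfoA v]) []
  (PySem.List.sorted prioritized pvKeyA false).map PySem.Dict.items

-- ===== PORT B =====
def pvRulesB : List (String × String × String) :=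
  [("encryption", "critical", "medium"), ("protocol", "high", "low"),
   ("segmentation", "high", "high"), ("monitoring", "medium", "low"),
   ("subnet", "medium", "medium")]

def pvGoB : List (String × String × String) → String → String × String
  | [], _ => ("low", "unknown")
  | (k, p, e) :: rest, low => if PySem.Str.isIn k low then (p, e) else pvGoB rest low

def pvClassifyB (v : String) : String × String := pvGoB pvRulesB (PySem.Str.lower v)

def pvItemB (v : String) (pe : String × String) : List (String × String) :=
  [("violation", v), ("priority", pe.1), ("effort", pe.2)]

-- the four buckets (critical, high, medium, low) as a quadruple
def pvStepB (acc : List (List (String × String)) × List (List (String × String)) ×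
                   List (List (String × String)) × List (List (String × String)))
    (v : String) :
    List (List (String × String)) × List (List (String × String)) ×
    List (List (String × String)) × List (List (String × String)) :=
  let pe := pvClassifyB v
  let it := pvItemB v pe
  if pe.1 = "critical" then (acc.1 ++ [it], acc.2.1, acc.2.2.1, acc.2.2.2)
  else if pe.1 = "high" then (acc.1, acc.2.1 ++ [it], acc.2.2.1, acc.2.2.2)
  else if pe.1 = "medium" then (acc.1, acc.2.1, acc.2.2.1 ++ [it], acc.2.2.2)
  else (acc.1, acc.2.1, acc.2.2.1, acc.2.2.2 ++ [it])

def prioritize_remediation_py_alt (violations : List String) : List (List (String × String)) :=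
  let b := violations.foldl pvStepB ([], [], [], [])
  b.1 ++ b.2.1 ++ b.2.2.1 ++ b.2.2.2

-- ===== PRECONDITION & SPEC =====
def Spec_prioritize_remediation_py (violations : List String) (out : List (List (String × String))) : Prop := out = prioritize_remediation_py_alt violations
instance (violations : List String) (out : List (List (String × String))) : Decidable (Spec_prioritize_remediation_py violations out) := by unfold Spec_prioritize_remediation_py; infer_instance

-- ===== CLAIM (what is proved, stated in full; the proofs are below) =====
def Claim_equal_prioritize_remediation_py : Prop := ∀ (violations : List String), Dom_prioritize_remediation_py violations → Spec_prioritize_remediation_py violations (prioritize_remediation_py violations)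

-- ===== LEMMAS AND PROOFS =====

-- the numeric rank A's sort key assigns to each priority level (proof helper)
def pvRank (p : String) : Int :=
  if p = "critical" then 0 else if p = "high" then 1 else if p = "medium" then 2 else 3

lemma pvClassify_cases (v : String) :
    (pvClassifyB v).1 = "critical" ∨ (pvClassifyB v).1 = "high" ∨
    (pvClassifyB v).1 = "medium" ∨ (pvClassifyB v).1 = "low" := by
  simp only [pvClassifyB, pvRulesB, pvGoB]
  split_ifs <;> simp

lemma pvItem_eq (v : String) : (pvInfoA v).items = pvItemB v (pvClassifyB v) := by
  simp only [pvInfoA, pvPrioMapA, pvInnerA, pvClassifyB, pvRulesB, pvGoB, pvItemB]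
  split_ifs <;> rfl

lemma pvInfo_eq_mk (v : String) :
    pvInfoA v = PySem.Dict.mk (pvItemB v (pvClassifyB v)) :=
  PySem.Dict.ext (pvItem_eq v)

lemma pvKey_eq (v : String) : pvKeyA (pvInfoA v) = pvRank (pvClassifyB v).1 := by
  rw [pvInfo_eq_mk v]
  rcases hp : pvClassifyB v with ⟨p, e⟩
  have h4 := pvClassify_cases v
  rw [hp] at h4
  rcases h4 with h | h | h | h <;> simp only at h <;> subst h <;> rfl

-- insertBy skips a block it is not 'before' any element of
lemma insertBy_append_not_before {α : Type} (before : α → α → Bool) (x : α) (ys zs : List α)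
    (h : ∀ y ∈ ys, before x y = false) :
    PySem.List.insertBy before x (ys ++ zs) = ys ++ PySem.List.insertBy before x zs := by
  induction ys with
  | nil => simp
  | cons y ys ih =>
      simp only [List.cons_append, PySem.List.insertBy, h y (by simp)]
      simp only [Bool.false_eq_true, if_false, List.cons.injEq, true_and]
      exact ih (fun y hy => h y (by simp [hy]))

-- insertBy puts x in front of a block it is 'before' every element of
lemma insertBy_all_before {α : Type} (before : α → α → Bool) (x : α) (zs : List α)
    (h : ∀ z ∈ zs, before x z = true) :
    PySem.List.insertBy before x zs = x :: zs := by
  cases zs with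
  | nil => rfl
  | cons z zs => simp only [PySem.List.insertBy, h z (by simp), if_pos]

-- a stable sort whose keys all lie in {0,1,2,3} is the concatenation of the four key-buckets
lemma sorted_int_buckets {α : Type} (key : α → Int) (l : List α)
    (hk : ∀ x ∈ l, key x = 0 ∨ key x = 1 ∨ key x = 2 ∨ key x = 3) :
    PySem.List.sorted l key false =
      l.filter (fun x => key x = 0) ++ (l.filter (fun x => key x = 1) ++
        (l.filter (fun x => key x = 2) ++ l.filter (fun x => key x = 3))) := by
  rw [PySem.List.sorted_eq_foldl_insertBy]
  induction l using List.reverseRecOn with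
  | nil => rfl
  | append_singleton l x ih =>
      have hl : ∀ y ∈ l, key y = 0 ∨ key y = 1 ∨ key y = 2 ∨ key y = 3 :=
        fun y hy => hk y (by simp [hy])
      rw [List.foldl_append, List.foldl_cons, List.foldl_nil, ih hl]
      have f0 : ∀ y ∈ l.filter (fun x => key x = 0), key y = 0 := by
        intro y hy; simpa using List.of_mem_filter hy
      have f1 : ∀ y ∈ l.filter (fun x => key x = 1), key y = 1 := by
        intro y hy; simpa using List.of_mem_filter hy
      have f2 : ∀ y ∈ l.filter (fun x => key x = 2), key y = 2 := by
        intro y hy; simpa using List.of_mem_filter hy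
      have f3 : ∀ y ∈ l.filter (fun x => key x = 3), key y = 3 := by
        intro y hy; simpa using List.of_mem_filter hy
      rcases hk x (by simp) with hx | hx | hx | hx
      · -- key x = 0: x goes to the end of bucket 0
        rw [insertBy_append_not_before _ x _ _ (fun y hy => by simp [hx, f0 y hy]),
            insertBy_all_before _ x _ (fun z hz => by
              rcases List.mem_append.1 hz with hz | hz
              · simp [hx, f1 z hz]
              · rcases List.mem_append.1 hz with hz | hz
                · simp [hx, f2 z hz]
                · simp [hx, f3 z hz])]
        simp [List.filter_append, hx]
      · -- key x = 1
        rw [insertBy_append_not_before _ x _ _ (fun y hy => by simp [hx, f0 y hy]),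
            insertBy_append_not_before _ x _ _ (fun y hy => by simp [hx, f1 y hy]),
            insertBy_all_before _ x _ (fun z hz => by
              rcases List.mem_append.1 hz with hz | hz
              · simp [hx, f2 z hz]
              · simp [hx, f3 z hz])]
        simp [List.filter_append, hx]
      · -- key x = 2
        rw [insertBy_append_not_before _ x _ _ (fun y hy => by simp [hx, f0 y hy]),
            insertBy_append_not_before _ x _ _ (fun y hy => by simp [hx, f1 y hy]),
            insertBy_append_not_before _ x _ _ (fun y hy => by simp [hx, f2 y hy]),
            insertBy_all_before _ x _ (fun z hz => by simp [hx, f3 z hz])]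
        simp [List.filter_append, hx]
      · -- key x = 3: x goes to the very end
        rw [PySem.List.insertBy_of_forall_not_before _ x _ (fun y hy => by
              rcases List.mem_append.1 hy with hy | hy
              · simp [hx, f0 y hy]
              · rcases List.mem_append.1 hy with hy | hy
                · simp [hx, f1 y hy]
                · rcases List.mem_append.1 hy with hy | hy
                  · simp [hx, f2 y hy]
                  · simp [hx, f3 y hy])]
        simp [List.filter_append, hx]

-- B's single pass computes the four buckets as filters of the input
lemma pvFold_buckets (l : List String)
    (c h m lo : List (List (String × String))) :
    l.foldl pvStepB (c, h, m, lo) =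
      (c ++ (l.filter (fun v => (pvClassifyB v).1 = "critical")).map (fun v => pvItemB v (pvClassifyB v)),
       h ++ (l.filter (fun v => (pvClassifyB v).1 = "high")).map (fun v => pvItemB v (pvClassifyB v)),
       m ++ (l.filter (fun v => (pvClassifyB v).1 = "medium")).map (fun v => pvItemB v (pvClassifyB v)),
       lo ++ (l.filter (fun v => (pvClassifyB v).1 = "low")).map (fun v => pvItemB v (pvClassifyB v))) := by
  induction l generalizing c h m lo with
  | nil => simp
  | cons v l ih =>
      have h4 := pvClassify_cases v
      simp only [List.foldl_cons, pvStepB]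
      rcases h4 with h1 | h1 | h1 | h1
      · rw [if_pos h1, ih]; simp [h1]
      · rw [if_neg (by simp [h1]), if_pos h1, ih]; simp [h1]
      · rw [if_neg (by simp [h1]), if_neg (by simp [h1]), if_pos h1, ih]
        simp [h1]
      · rw [if_neg (by simp [h1]), if_neg (by simp [h1]), if_neg (by simp [h1]), ih]
        simp [h1]

-- the rank-i bucket of A is exactly the priority-named bucket of B
set_option maxHeartbeats 1600000 in
lemma pvBucket_eq (violations : List String) (i : Int) (p : String)
    (hip : ∀ v, (pvKeyA (pvInfoA v) = i) ↔ ((pvClassifyB v).1 = p)) :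
    ((violations.map pvInfoA).filter (fun d => pvKeyA d = i)).map PySem.Dict.items =
      (violations.filter (fun v => (pvClassifyB v).1 = p)).map (fun v => pvItemB v (pvClassifyB v)) := by
  rw [List.filter_map, List.map_map]
  rw [List.filter_congr (fun v _ => by
        show decide (pvKeyA (pvInfoA v) = i) = decide ((pvClassifyB v).1 = p)
        simp [hip v])]
  exact List.map_congr_left (fun v _ => pvItem_eq v)

lemma pvRank_cases (v : String) :
    ((pvKeyA (pvInfoA v) = 0) ↔ ((pvClassifyB v).1 = "critical")) ∧
    ((pvKeyA (pvInfoA v) = 1) ↔ ((pvClassifyB v).1 = "high")) ∧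
    ((pvKeyA (pvInfoA v) = 2) ↔ ((pvClassifyB v).1 = "medium")) ∧
    ((pvKeyA (pvInfoA v) = 3) ↔ ((pvClassifyB v).1 = "low")) := by
  rw [pvKey_eq]
  rcases pvClassify_cases v with h | h | h | h <;> rw [h] <;> simp [pvRank]

-- ===== VERDICT (by name: the statement is the Claim_ definition above) =====
set_option maxHeartbeats 1600000 in
theorem prioritize_remediation_py_spec : Claim_equal_prioritize_remediation_py := by
  intro violations _
  show prioritize_remediation_py violations = prioritize_remediation_py_alt violations
  unfold prioritize_remediation_py prioritize_remediation_py_alt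
  rw [PySem.List.foldl_append_singleton_eq_map, List.nil_append, pvFold_buckets]
  dsimp only
  rw [sorted_int_buckets pvKeyA _ (by
        intro d hd
        obtain ⟨v, _, rfl⟩ := List.mem_map.1 hd
        rw [pvKey_eq]
        rcases pvClassify_cases v with h | h | h | h <;> rw [h] <;> simp [pvRank])]
  simp only [List.map_append, List.nil_append]
  rw [pvBucket_eq violations 0 "critical" (fun v => (pvRank_cases v).1),
      pvBucket_eq violations 1 "high" (fun v => (pvRank_cases v).2.1),
      pvBucket_eq violations 2 "medium" (fun v => (pvRank_cases v).2.2.1),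
      pvBucket_eq violations 3 "low" (fun v => (pvRank_cases v).2.2.2)]
  simp [List.append_assoc]
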